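-- pv_equiv track=rewrite | github.com/jiangjiechen/VENCE | verfication/main.py | del_list
-- ===== SOURCE A (Python) =====
-- def del_list(list1):
--     list2=[]
--     if len(list1)==1:
--         return None
--     for i,item in enumerate(list1):
--         if i==0:
--             if list1[i+1]-list1[i]==1:
--                 list2.append(item)
--         elif i==len(list1)-1:
--             if list1[i]-list1[i-1]==1:
--                 list2.append(item)
--         else:
--             if list1[i]-list1[i-1]==1 or list1[i+1]-list1[i]==1:
--                 list2.append(item)
--     return list2
-- ===== SOURCE B (Python) =====
-- def del_list(list1):
--     if len(list1) == 1:
--         return None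
--     out = []
--     run = []
--     for x in list1:
--         if run and x - run[-1] == 1:
--             run.append(x)
--         else:
--             if len(run) >= 2:
--                 out.extend(run)
--             run = [x]
--     if len(run) >= 2:
--         out.extend(run)
--     return out
-- ===== Notes on version B (the rewrite author's own statement) =====
-- stated objective: alternative
-- what changed: B groups the list into maximal runs of consecutive (+1) values and emits each run of length >= 2 whole, instead of A's per-element first/last/middle case analysis testing both neighbors of every position.
import Mathlib
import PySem

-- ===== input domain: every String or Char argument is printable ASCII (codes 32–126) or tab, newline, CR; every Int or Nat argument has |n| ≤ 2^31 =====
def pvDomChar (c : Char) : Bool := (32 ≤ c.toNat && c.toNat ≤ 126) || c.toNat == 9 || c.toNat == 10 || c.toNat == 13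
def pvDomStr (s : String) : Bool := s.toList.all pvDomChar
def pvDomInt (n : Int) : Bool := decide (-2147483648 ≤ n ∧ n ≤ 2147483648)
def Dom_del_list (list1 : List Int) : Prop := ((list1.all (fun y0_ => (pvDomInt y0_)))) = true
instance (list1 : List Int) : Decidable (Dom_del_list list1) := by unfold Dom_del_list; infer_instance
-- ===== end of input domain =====

-- B groups the list into maximal runs of consecutive (+1) values and emits each run of
-- length >= 2 whole, instead of A's per-element first/last/middle neighbor case analysis.

-- ===== PORT A =====
def del_list (list1 : List Int) : Option (List Int) :=
  if list1.length = 1 then none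
  else
    some ((PySem.List.enumerate list1 0).foldl (fun list2 p =>
      if p.1 = 0 then
        if PySem.List.pyGetD list1 (p.1 + 1) 0 - PySem.List.pyGetD list1 p.1 0 = 1 then
          list2 ++ [p.2] else list2
      else if p.1 = (list1.length : Int) - 1 then
        if PySem.List.pyGetD list1 p.1 0 - PySem.List.pyGetD list1 (p.1 - 1) 0 = 1 then
          list2 ++ [p.2] else list2
      else
        if PySem.List.pyGetD list1 p.1 0 - PySem.List.pyGetD list1 (p.1 - 1) 0 = 1 ∨
           PySem.List.pyGetD list1 (p.1 + 1) 0 - PySem.List.pyGetD list1 p.1 0 = 1 then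
          list2 ++ [p.2] else list2) [])

-- ===== PORT B =====
-- one loop iteration of Source B: state = (out, run)
def pvBStep (s : List Int × List Int) (x : Int) : List Int × List Int :=
  if s.2 ≠ [] ∧ x - PySem.List.pyGetD s.2 (-1) 0 = 1 then (s.1, s.2 ++ [x])
  else ((if 2 ≤ s.2.length then s.1 ++ s.2 else s.1), [x])

def del_list_alt (list1 : List Int) : Option (List Int) :=
  if list1.length = 1 then none
  else
    let s := list1.foldl pvBStep ([], [])
    some (if 2 ≤ s.2.length then s.1 ++ s.2 else s.1)

-- ===== PRECONDITION & SPEC =====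
def Spec_del_list (list1 : List Int) (out : Option (List Int)) : Prop := out = del_list_alt list1
instance (list1 : List Int) (out : Option (List Int)) : Decidable (Spec_del_list list1 out) := by unfold Spec_del_list; infer_instance

-- ===== CLAIM (what is proved, stated in full; the proofs are below) =====
def Claim_equal_del_list : Prop := ∀ (list1 : List Int), Dom_del_list list1 → Spec_del_list list1 (del_list list1)

-- ===== LEMMAS AND PROOFS =====

-- is x one more than the previous element (if any)?
def pvAdjL : Option Int → Int → Bool
  | none, _ => false
  | some p, x => decide (x - p = 1)

-- is the next element (if any) one more than x?
def pvAdjR : Int → List Int → Bool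
  | _, [] => false
  | x, y :: _ => decide (y - x = 1)

-- common specification: kept elements of the suffix, given the previous element
def pvKr : Option Int → List Int → List Int
  | _, [] => []
  | prev, x :: rest => (if pvAdjL prev x || pvAdjR x rest then [x] else []) ++ pvKr (some x) rest

-- A's per-element condition, as a Bool
def pvCondA (a : List Int) (p : Int × Int) : Bool :=
  if p.1 = 0 then
    decide (PySem.List.pyGetD a (p.1 + 1) 0 - PySem.List.pyGetD a p.1 0 = 1)
  else if p.1 = (a.length : Int) - 1 then
    decide (PySem.List.pyGetD a p.1 0 - PySem.List.pyGetD a (p.1 - 1) 0 = 1)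
  else
    decide (PySem.List.pyGetD a p.1 0 - PySem.List.pyGetD a (p.1 - 1) 0 = 1 ∨
            PySem.List.pyGetD a (p.1 + 1) 0 - PySem.List.pyGetD a p.1 0 = 1)

lemma pvGetD_mid (pre rest : List Int) (x d : Int) :
    (pre ++ x :: rest).getD pre.length d = x := by
  rw [List.getD_eq_getElem?_getD, List.getElem?_append_right (le_refl _)]
  simp

-- A's filtered enumerate equals pvKr, by induction on the suffix
lemma pvA_suffix (a : List Int) (h1 : a.length ≠ 1) :
    ∀ (suf pre : List Int), a = pre ++ suf →
      ((PySem.List.enumerate suf (pre.length : Int)).filter (pvCondA a)).map Prod.snd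
        = pvKr pre.getLast? suf := by
  intro suf
  induction suf with
  | nil => intro pre h; simp [pvKr, PySem.List.enumerate_nil]
  | cons x rest ih =>
    intro pre h
    have hsplit : a = (pre ++ [x]) ++ rest := by simp [h]
    have ihx := ih (pre ++ [x]) hsplit
    have hlen : ((pre ++ [x]).length : Int) = (pre.length : Int) + 1 := by
      simp
    rw [PySem.List.enumerate_cons, List.filter_cons]
    have hcond : pvCondA a ((pre.length : Int), x) = (pvAdjL pre.getLast? x || pvAdjR x rest) := by
      have hx : PySem.List.pyGetD a (pre.length : Int) 0 = x := by
        rw [PySem.List.pyGetD_natCast, h, pvGetD_mid]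
      by_cases hpre : pre = []
      · subst hpre
        -- index 0 branch; since a.length ≠ 1, rest ≠ []
        cases rest with
        | nil => exact absurd (by simp [h]) h1
        | cons y ys =>
          have hy : PySem.List.pyGetD a ((0 : Int) + 1) 0 = y := by
            have : ((0 : Int) + 1) = (([x].length : Nat) : Int) := by simp
            rw [this, PySem.List.pyGetD_natCast, h]
            simp
          simp only [pvCondA, List.length_nil, Nat.cast_zero] at *
          rw [hy] at *
          simp [pvAdjL, pvAdjR, hx]
      · have hpos : 0 < pre.length := List.length_pos_iff.mpr hpre
        have hne0 : ((pre.length : Int)) ≠ 0 := by omega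
        have hlast : pre.getLast? = some (pre.getLast hpre) := (List.getLast?_eq_some_getLast hpre)
        have hleft : PySem.List.pyGetD a ((pre.length : Int) - 1) 0 = pre.getLast hpre := by
          have e : ((pre.length : Int) - 1) = ((pre.length - 1 : Nat) : Int) := by omega
          rw [e, PySem.List.pyGetD_natCast, h, List.getD_eq_getElem?_getD,
            List.getElem?_append_left (by omega), List.getLast_eq_getElem]
          simp [List.getElem?_eq_getElem (by omega : pre.length - 1 < pre.length)]
        cases rest with
        | nil =>
          have hlenlast : (pre.length : Int) = (a.length : Int) - 1 := by
            rw [h]; simp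
          simp only [pvCondA, if_neg hne0]
          rw [if_pos hlenlast]
          rw [hx, hleft, hlast]
          simp [pvAdjL, pvAdjR]
        | cons y ys =>
          have hy : PySem.List.pyGetD a ((pre.length : Int) + 1) 0 = y := by
            have e : ((pre.length : Int) + 1) = (((pre ++ [x]).length : Nat) : Int) := by simp
            rw [e, PySem.List.pyGetD_natCast, hsplit]
            exact pvGetD_mid (pre ++ [x]) ys y 0
          have hnelast : (pre.length : Int) ≠ (a.length : Int) - 1 := by
            rw [h]; simp; omega
          simp only [pvCondA, if_neg hne0, if_neg hnelast]
          rw [hx, hleft, hy, hlast]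
          simp [pvAdjL, pvAdjR, or_comm, Bool.or_comm]
    rw [hcond]
    rw [hlen] at ihx
    by_cases hb : (pvAdjL pre.getLast? x || pvAdjR x rest) = true <;>
      simp [pvKr, hb, ihx, List.getLast?_append]

-- A's fold as filter-then-map
lemma pvA_filter (a : List Int) (h1 : a.length ≠ 1) :
    del_list a = some (((PySem.List.enumerate a 0).filter (pvCondA a)).map Prod.snd) := by
  unfold del_list
  rw [if_neg h1]
  refine congrArg some ?_
  have hfun : (PySem.List.enumerate a 0).foldl (fun list2 p =>
      if p.1 = 0 then
        if PySem.List.pyGetD a (p.1 + 1) 0 - PySem.List.pyGetD a p.1 0 = 1 then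
          list2 ++ [p.2] else list2
      else if p.1 = (a.length : Int) - 1 then
        if PySem.List.pyGetD a p.1 0 - PySem.List.pyGetD a (p.1 - 1) 0 = 1 then
          list2 ++ [p.2] else list2
      else
        if PySem.List.pyGetD a p.1 0 - PySem.List.pyGetD a (p.1 - 1) 0 = 1 ∨
           PySem.List.pyGetD a (p.1 + 1) 0 - PySem.List.pyGetD a p.1 0 = 1 then
          list2 ++ [p.2] else list2) []
      = (PySem.List.enumerate a 0).foldl
          (fun list2 p => if pvCondA a p then list2 ++ [p.2] else list2) [] := by
    refine PySem.List.foldl_congr_mem _ _ _ _ ?_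
    intro acc p _
    unfold pvCondA
    split_ifs <;> simp_all
  rw [hfun, PySem.List.foldl_append_if (pvCondA a) Prod.snd _ []]
  exact (List.nil_append _)

-- B's loop invariant: finishing the fold from a nonempty run
lemma pvB_fold (t : List Int) : ∀ (out run : List Int) (hr : run ≠ []),
    (if 2 ≤ (t.foldl pvBStep (out, run)).2.length
       then (t.foldl pvBStep (out, run)).1 ++ (t.foldl pvBStep (out, run)).2
       else (t.foldl pvBStep (out, run)).1)
      = out ++ (if 2 ≤ run.length ∨ pvAdjR (run.getLast hr) t = true then run else [])
          ++ pvKr (some (run.getLast hr)) t := by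
  induction t with
  | nil =>
    intro out run hr
    simp only [List.foldl_nil, pvKr, pvAdjR, List.append_nil]
    split_ifs with h h2 h2 <;> simp_all
    omega
  | cons x t' ih =>
    intro out run hr
    have hlastD : PySem.List.pyGetD run (-1) 0 = run.getLast hr :=
      PySem.List.pyGetD_neg_one run 0 hr
    by_cases h : x - run.getLast hr = 1
    · have hstep : pvBStep (out, run) x = (out, run ++ [x]) := by
        unfold pvBStep
        rw [if_pos ⟨hr, by rw [hlastD]; exact h⟩]
      rw [List.foldl_cons, hstep]
      have hlast2 : (run ++ [x]).getLast (by simp) = x := by simp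
      have hih := ih out (run ++ [x]) (by simp)
      rw [hlast2] at hih
      rw [hih]
      have hrun2 : 2 ≤ (run ++ [x]).length := by
        have := List.length_pos_iff.mpr hr; simp; omega
      rw [if_pos (Or.inl hrun2)]
      have hAdjR : pvAdjR (run.getLast hr) (x :: t') = true := by
        simp [pvAdjR, h]
      rw [if_pos (Or.inr hAdjR)]
      have hkr : pvKr (some (run.getLast hr)) (x :: t') = [x] ++ pvKr (some x) t' := by
        rw [pvKr, if_pos (by simp [pvAdjL, h])]
      rw [hkr]
      simp [List.append_assoc]
    · have hstep : pvBStep (out, run) x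
          = ((if 2 ≤ run.length then out ++ run else out), [x]) := by
        unfold pvBStep
        rw [if_neg (by rw [hlastD]; tauto)]
      rw [List.foldl_cons, hstep]
      have hih := ih (if 2 ≤ run.length then out ++ run else out) [x] (by simp)
      simp only [List.getLast_singleton] at hih
      rw [hih]
      have hAdjRF : pvAdjR (run.getLast hr) (x :: t') = false := by
        simp only [pvAdjR, decide_eq_false_iff_not]; exact h
      have hkr : pvKr (some (run.getLast hr)) (x :: t')
          = (if pvAdjR x t' = true then [x] else []) ++ pvKr (some x) t' := by
        rw [pvKr]
        congr 1
        simp [pvAdjL, h]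
      rw [hkr]
      have hc1 : (2 ≤ run.length ∨ pvAdjR (run.getLast hr) (x :: t') = true) ↔ 2 ≤ run.length := by
        simp [hAdjRF]
      rw [if_congr hc1 rfl rfl]
      by_cases hx : pvAdjR x t' = true <;> by_cases hrl : 2 ≤ run.length <;>
        simp [hx, hrl, List.append_assoc]

-- B computes pvKr none
lemma pvB_eq (a : List Int) (h1 : a.length ≠ 1) :
    del_list_alt a = some (pvKr none a) := by
  unfold del_list_alt
  rw [if_neg h1]
  refine congrArg some ?_
  cases a with
  | nil => rfl
  | cons x t =>
    have hstep : pvBStep ([], []) x = ([], [x]) := by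
      unfold pvBStep
      rw [if_neg (by simp)]
      simp
    show (if 2 ≤ ((x :: t).foldl pvBStep ([], [])).2.length
       then ((x :: t).foldl pvBStep ([], [])).1 ++ ((x :: t).foldl pvBStep ([], [])).2
       else ((x :: t).foldl pvBStep ([], [])).1) = pvKr none (x :: t)
    rw [List.foldl_cons, hstep, pvB_fold t [] [x] (by simp)]
    simp only [List.getLast_singleton]
    rw [pvKr]
    have hc2 : (pvAdjL none x || pvAdjR x t) = pvAdjR x t := by simp [pvAdjL]
    rw [hc2]
    by_cases hx : pvAdjR x t = true <;> simp [hx]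

-- ===== VERDICT (by name: the statement is the Claim_ definition above) =====
theorem del_list_spec : Claim_equal_del_list := by
  intro a _
  show del_list a = del_list_alt a
  by_cases h1 : a.length = 1
  · unfold del_list del_list_alt
    rw [if_pos h1, if_pos h1]
  · rw [pvA_filter a h1, pvB_eq a h1]
    refine congrArg some ?_
    have := pvA_suffix a h1 a [] (by simp)
    simpa using this
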